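-- pv_equiv track=rewrite | github.com/pypi-data/pypi-mirror-402 | packages/reveal-cli/reveal_cli-0.39.0-py3-none-any.whl/reveal/diff/structure_diff.py | diff_imports
-- ===== SOURCE A (Python) =====
-- from typing import Dict, Any, List, Optional
--
-- def diff_imports(left_imports: List[Dict],
--                  right_imports: List[Dict]) -> tuple[Dict[str, int], List[Dict]]:
--     """Compare import lists and return summary counts + details.
--
--     Args:
--         left_imports: List of imports from left structure
--         right_imports: List of imports from right structure
--
--     Returns:
--         Tuple of (summary_dict, details_list)
--     """
--     # Normalize imports for comparison (use content field)
--     left_contents = {imp.get('content', ''): imp for imp in left_imports}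
--     right_contents = {imp.get('content', ''): imp for imp in right_imports}
--
--     added_contents = right_contents.keys() - left_contents.keys()
--     removed_contents = left_contents.keys() - right_contents.keys()
--
--     details = []
--
--     # Added imports
--     for content in sorted(added_contents):
--         imp = right_contents[content]
--         details.append({
--             'type': 'added',
--             'content': content,
--             'line': imp.get('line')
--         })
--
--     # Removed imports
--     for content in sorted(removed_contents):
--         imp = left_contents[content]
--         details.append({
--             'type': 'removed',
--             'content': content,
--             'line': imp.get('line')
--         })
--
--     summary = {
--         'added': len(added_contents),
--         'removed': len(removed_contents)
--     }
--
--     return summary, details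
-- ===== SOURCE B (Python) =====
-- def diff_imports(left_imports, right_imports):
--     """Sort-merge diff: dedup each side keeping the last occurrence per content,
--     sort the (content, import) pairs, then classify with one two-pointer merge
--     of the two sorted lists (no dicts, no key-set difference)."""
--     def sorted_uniq(imps):
--         seen = set()
--         pairs = []
--         for imp in reversed(imps):
--             c = imp.get('content', '')
--             if c not in seen:
--                 seen.add(c)
--                 pairs.append((c, imp))
--         pairs.sort(key=lambda p: p[0])
--         return pairs
--
--     L = sorted_uniq(left_imports)
--     R = sorted_uniq(right_imports)
--     added, removed = [], []
--     i = j = 0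
--     while i < len(L) or j < len(R):
--         if j == len(R) or (i < len(L) and L[i][0] < R[j][0]):
--             c, imp = L[i]
--             removed.append({'type': 'removed', 'content': c, 'line': imp.get('line')})
--             i += 1
--         elif i == len(L) or R[j][0] < L[i][0]:
--             c, imp = R[j]
--             added.append({'type': 'added', 'content': c, 'line': imp.get('line')})
--             j += 1
--         else:
--             i += 1
--             j += 1
--     return {'added': len(added), 'removed': len(removed)}, added + removed
-- ===== Notes on version B (the rewrite author's own statement) =====
-- stated objective: alternative
-- what changed: Replaces A's per-side dicts and key-set differences by a sort-merge diff: each side is deduplicated keeping the last occurrence per content, the (content, import) pairs are sorted, and one two-pointer merge of the two sorted lists classifies keys as added/removed.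
import Mathlib
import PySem

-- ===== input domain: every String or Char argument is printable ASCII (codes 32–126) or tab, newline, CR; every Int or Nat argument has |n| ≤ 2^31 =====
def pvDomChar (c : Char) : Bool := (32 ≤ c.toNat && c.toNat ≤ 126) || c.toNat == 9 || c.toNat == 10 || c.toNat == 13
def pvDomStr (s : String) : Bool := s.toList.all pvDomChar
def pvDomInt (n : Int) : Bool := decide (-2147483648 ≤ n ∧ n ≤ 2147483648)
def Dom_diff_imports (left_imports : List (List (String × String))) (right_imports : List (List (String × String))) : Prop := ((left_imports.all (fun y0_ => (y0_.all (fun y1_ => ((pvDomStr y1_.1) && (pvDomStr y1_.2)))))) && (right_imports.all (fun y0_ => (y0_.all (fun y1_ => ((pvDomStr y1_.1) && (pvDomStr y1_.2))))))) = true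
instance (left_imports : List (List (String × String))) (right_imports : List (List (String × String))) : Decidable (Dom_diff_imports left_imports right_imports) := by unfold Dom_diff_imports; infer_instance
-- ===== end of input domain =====

-- B replaces A's per-side dicts plus key-set differences by a sort-merge diff: dedup-last per side,
-- sort the (content, import) pairs, one two-pointer merge classifies added/removed (objective: alternative).

-- imp.get(k, dflt) on one import dict (assoc list, first match wins)
def pvImpGet (imp : List (String × String)) (k dflt : String) : String :=
  (PySem.Dict.mk imp).getD k dflt

def pvContent (imp : List (String × String)) : String := pvImpGet imp "content" ""

-- imp.get('line'); Pre_diff_imports guarantees the key is present wherever this is reached,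
-- so the "" default is never the produced value on admitted inputs.
def pvLine (imp : List (String × String)) : String := pvImpGet imp "line" ""

-- ===== PORT A =====
def diff_imports (left_imports : List (List (String × String))) (right_imports : List (List (String × String))) : (List (String × Int)) × (List (List (String × String))) :=
  let left_contents : PySem.Dict String (List (String × String)) :=
    left_imports.foldl (fun d imp => d.insert (pvContent imp) imp) PySem.Dict.empty
  let right_contents : PySem.Dict String (List (String × String)) :=
    right_imports.foldl (fun d imp => d.insert (pvContent imp) imp) PySem.Dict.empty
  let added_contents : PySem.Set String := PySem.Set.diff right_contents.keys left_contents.keys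
  let removed_contents : PySem.Set String := PySem.Set.diff left_contents.keys right_contents.keys
  let details : List (List (String × String)) :=
    (PySem.List.sorted added_contents (fun c => c) false).foldl
      (fun acc c => acc ++ [[("type", "added"), ("content", c), ("line", pvLine (right_contents.getD c []))]]) []
  let details :=
    (PySem.List.sorted removed_contents (fun c => c) false).foldl
      (fun acc c => acc ++ [[("type", "removed"), ("content", c), ("line", pvLine (left_contents.getD c []))]]) details
  ([("added", (added_contents.length : Int)), ("removed", (removed_contents.length : Int))], details)

-- ===== PORT B =====
-- the two detail-record literals B builds
def pvMkAdd (c : String) (imp : List (String × String)) : List (String × String) :=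
  [("type", "added"), ("content", c), ("line", pvLine imp)]
def pvMkRem (c : String) (imp : List (String × String)) : List (String × String) :=
  [("type", "removed"), ("content", c), ("line", pvLine imp)]

-- sorted_uniq: dedup keeping the LAST occurrence per content (first of the reversed list), then sort by content
def pvSortedUniq (imps : List (List (String × String))) : List (String × List (String × String)) :=
  let sp := imps.reverse.foldl
    (fun (sp : PySem.Set String × List (String × List (String × String))) imp =>
      let c := pvContent imp
      if PySem.Set.contains sp.1 c then sp
      else (PySem.Set.add sp.1 c, sp.2 ++ [(c, imp)]))
    (PySem.Set.empty, [])
  PySem.List.sorted sp.2 (fun p => p.1) false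

-- the two-pointer while loop over the two sorted lists
def pvMerge : List (String × List (String × String)) → List (String × List (String × String)) → List (List (String × String)) × List (List (String × String))
  | [], [] => ([], [])
  | (c, imp) :: ls, [] =>
      let p := pvMerge ls []
      (p.1, pvMkRem c imp :: p.2)
  | [], (c, imp) :: rs =>
      let p := pvMerge [] rs
      (pvMkAdd c imp :: p.1, p.2)
  | (cl, il) :: ls, (cr, ir) :: rs =>
      if cl < cr then
        let p := pvMerge ls ((cr, ir) :: rs)
        (p.1, pvMkRem cl il :: p.2)
      else if cr < cl then
        let p := pvMerge ((cl, il) :: ls) rs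
        (pvMkAdd cr ir :: p.1, p.2)
      else
        pvMerge ls rs
termination_by l r => l.length + r.length

def diff_imports_alt (left_imports : List (List (String × String))) (right_imports : List (List (String × String))) : (List (String × Int)) × (List (List (String × String))) :=
  let Ls := pvSortedUniq left_imports
  let Rs := pvSortedUniq right_imports
  let p := pvMerge Ls Rs
  ([("added", (p.1.length : Int)), ("removed", (p.2.length : Int))], p.1 ++ p.2)

-- ===== PRECONDITION & SPEC =====
-- Pre_ excludes inputs where some import whose content is missing on the other side lacks a 'line'
-- key: there Python's imp.get('line') is None, so A returns a detail dict whose 'line' value is not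
-- a String (outside the declared output type List (String × String)).
def Pre_diff_imports (left_imports : List (List (String × String))) (right_imports : List (List (String × String))) : Prop :=
  (∀ imp ∈ left_imports, pvContent imp ∈ right_imports.map pvContent ∨ ((PySem.Dict.mk imp).get? "line").isSome = true) ∧
  (∀ imp ∈ right_imports, pvContent imp ∈ left_imports.map pvContent ∨ ((PySem.Dict.mk imp).get? "line").isSome = true)
instance (left_imports : List (List (String × String))) (right_imports : List (List (String × String))) : Decidable (Pre_diff_imports left_imports right_imports) := by unfold Pre_diff_imports; infer_instance

def pvWitness_diff_imports : (List (List (String × String))) × (List (List (String × String))) :=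
  ([[("content", "a"), ("line", "1")]], [[("content", "b"), ("line", "2")]])

def Spec_diff_imports (left_imports : List (List (String × String))) (right_imports : List (List (String × String))) (out : (List (String × Int)) × (List (List (String × String)))) : Prop := out = diff_imports_alt left_imports right_imports
instance (left_imports : List (List (String × String))) (right_imports : List (List (String × String))) (out : (List (String × Int)) × (List (List (String × String)))) : Decidable (Spec_diff_imports left_imports right_imports out) := by unfold Spec_diff_imports; infer_instance

-- ===== CLAIM (what is proved, stated in full; the proofs are below) =====
def Claim_equal_diff_imports : Prop := ∀ (left_imports : List (List (String × String))) (right_imports : List (List (String × String))), Dom_diff_imports left_imports right_imports → Pre_diff_imports left_imports right_imports → Spec_diff_imports left_imports right_imports (diff_imports left_imports right_imports)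

-- ===== LEMMAS AND PROOFS =====

-- A's per-side dict (proof-only abbreviation)
def pvDictOf (l : List (List (String × String))) : PySem.Dict String (List (String × String)) :=
  l.foldl (fun d imp => d.insert (pvContent imp) imp) PySem.Dict.empty

theorem pvDictOf_eq (l : List (List (String × String))) :
    l.foldl (fun d imp => d.insert (pvContent imp) imp) PySem.Dict.empty = pvDictOf l := rfl

theorem pvDictOf_keys (l : List (List (String × String))) :
    (pvDictOf l).keys = PySem.Set.ofList (l.map pvContent) := by
  unfold pvDictOf
  rw [PySem.Dict.keys_foldl_insert_key]
  simp [PySem.Set.update_nil_left]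

theorem pvKeys_nodup (l : List (List (String × String))) : (pvDictOf l).keys.Nodup := by
  rw [pvDictOf_keys]; exact PySem.Set.nodup_ofList _

-- first occurrence by content (spec of the dedup scan over the reversed list)
def pvFirst : List (List (String × String)) → String → Option (List (String × String))
  | [], _ => none
  | x :: xs, c => if pvContent x = c then some x else pvFirst xs c

theorem pvFirst_reverse (l : List (List (String × String))) (c : String) :
    pvFirst l.reverse c = (pvDictOf l).get? c := by
  induction l using List.reverseRecOn with
  | nil => simp [pvFirst, pvDictOf, PySem.Dict.get?_empty]
  | append_singleton t x ih =>
      rw [List.reverse_append]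
      simp only [List.reverse_singleton, List.singleton_append, pvFirst]
      unfold pvDictOf
      rw [List.foldl_append]
      simp only [List.foldl_cons, List.foldl_nil]
      rw [PySem.Dict.get?_insert]
      rw [pvDictOf_eq] at *
      by_cases h : pvContent x = c
      · simp [h]
      · simp [h, Ne.symm h, ih]

-- the dedup fold: invariant over seen-set and accumulator
theorem pvUniqFold_spec (xs : List (List (String × String)))
    (s : PySem.Set String) (out : List (String × List (String × String)))
    (hinv : ∀ c, PySem.Set.contains s c = true ↔ c ∈ out.map Prod.fst)
    (hnd : (out.map Prod.fst).Nodup) :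
    let res := xs.foldl
      (fun (sp : PySem.Set String × List (String × List (String × String))) imp =>
        let c := pvContent imp
        if PySem.Set.contains sp.1 c then sp
        else (PySem.Set.add sp.1 c, sp.2 ++ [(c, imp)])) (s, out)
    (res.2.map Prod.fst).Nodup ∧
      ∀ c v, ((c, v) ∈ res.2 ↔ (c, v) ∈ out ∨ (c ∉ out.map Prod.fst ∧ pvFirst xs c = some v)) := by
  induction xs generalizing s out with
  | nil => exact ⟨hnd, by simp [pvFirst]⟩
  | cons x xs ih =>
      simp only [List.foldl_cons]
      by_cases hc : PySem.Set.contains s (pvContent x) = true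
      · rw [if_pos hc]
        obtain ⟨h1, h2⟩ := ih s out hinv hnd
        refine ⟨h1, fun c v => ?_⟩
        rw [h2]
        by_cases hcc : pvContent x = c
        · subst hcc
          have : pvContent x ∈ out.map Prod.fst := (hinv _).mp hc
          simp [pvFirst, this]
        · simp [pvFirst, hcc]
      · rw [if_neg hc]
        have hcnot : pvContent x ∉ out.map Prod.fst := fun h => hc ((hinv _).mpr h)
        have hinv' : ∀ c, PySem.Set.contains (PySem.Set.add s (pvContent x)) c = true ↔
            c ∈ (out ++ [(pvContent x, x)]).map Prod.fst := by
          intro c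
          rw [PySem.Set.contains_iff, PySem.Set.mem_add]
          simp only [List.map_append, List.map_cons, List.map_nil, List.mem_append, List.mem_singleton]
          rw [← PySem.Set.contains_iff, hinv]
        have hnd' : ((out ++ [(pvContent x, x)]).map Prod.fst).Nodup := by
          simp only [List.map_append, List.map_cons, List.map_nil]
          exact List.Nodup.append hnd (List.nodup_singleton _) (by simpa using hcnot)
        obtain ⟨h1, h2⟩ := ih _ _ hinv' hnd'
        refine ⟨h1, fun c v => ?_⟩
        rw [h2]
        by_cases hcc : pvContent x = c
        · subst hcc
          have hvo : ¬ (pvContent x, v) ∈ out := fun h => hcnot (List.mem_map_of_mem h)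
          simp [pvFirst, hvo, hcnot, eq_comm]
        · simp [pvFirst, hcc, Ne.symm hcc]

-- pvSortedUniq: key-strictly-sorted list of A's per-side dict entries
theorem pvSortedUniq_mem (l : List (List (String × String))) (c : String) (v : List (String × String)) :
    (c, v) ∈ pvSortedUniq l ↔ (pvDictOf l).get? c = some v := by
  obtain ⟨-, h2⟩ := pvUniqFold_spec l.reverse PySem.Set.empty []
    (by intro c; simp [PySem.Set.empty]) (by simp)
  unfold pvSortedUniq
  rw [PySem.List.mem_sorted, h2, pvFirst_reverse]
  simp

theorem pvSortedUniq_keys_nodup (l : List (List (String × String))) :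
    ((pvSortedUniq l).map Prod.fst).Nodup := by
  obtain ⟨h1, h2⟩ := pvUniqFold_spec l.reverse PySem.Set.empty []
    (by intro c; simp [PySem.Set.empty]) (by simp)
  unfold pvSortedUniq
  exact ((PySem.List.sorted_perm _ _ _).map Prod.fst).nodup_iff.mpr h1

theorem pvSortedUniq_pairwise (l : List (List (String × String))) :
    (pvSortedUniq l).Pairwise (fun a b => a.1 < b.1) := by
  have hle : (pvSortedUniq l).Pairwise (fun a b => a.1 ≤ b.1) :=
    PySem.List.sorted_pairwise _ _
  have hne : (pvSortedUniq l).Pairwise (fun a b => a.1 ≠ b.1) :=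
    (List.pairwise_map).mp (pvSortedUniq_keys_nodup l)
  exact (hle.and hne).imp (fun h => lt_of_le_of_ne h.1 h.2)

theorem pvSortedUniq_key_mem (l : List (List (String × String))) (c : String) :
    c ∈ (pvSortedUniq l).map Prod.fst ↔ c ∈ (pvDictOf l).keys := by
  rw [List.mem_map]
  constructor
  · rintro ⟨⟨c', v⟩, hm, rfl⟩
    have := (pvSortedUniq_mem l c' v).mp hm
    exact PySem.Dict.mem_keys_of_mem_items _ (PySem.Dict.mem_items_of_get?_eq_some _ this)
  · intro h
    have : ¬ (pvDictOf l).get? c = none := by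
      rw [PySem.Dict.get?_eq_none_iff_not_mem_keys]; exact fun hn => hn h
    obtain ⟨v, hv⟩ := Option.ne_none_iff_exists'.mp this
    exact ⟨(c, v), (pvSortedUniq_mem l c v).mpr hv, rfl⟩

-- merge of two key-strictly-sorted lists = the two filtered projections
theorem pvMerge_eq (Ls Rs : List (String × List (String × String)))
    (hL : Ls.Pairwise (fun a b => a.1 < b.1)) (hR : Rs.Pairwise (fun a b => a.1 < b.1)) :
    pvMerge Ls Rs =
      ((Rs.filter (fun p => !decide (p.1 ∈ Ls.map Prod.fst))).map (fun p => pvMkAdd p.1 p.2),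
       (Ls.filter (fun p => !decide (p.1 ∈ Rs.map Prod.fst))).map (fun p => pvMkRem p.1 p.2)) := by
  induction Ls, Rs using pvMerge.induct with
  | case1 => simp [pvMerge]
  | case2 c imp ls ih =>
      rw [pvMerge]
      rw [ih (hL.sublist (List.sublist_cons_self _ _)) hR]
      simp
  | case3 c imp rs ih =>
      rw [pvMerge]
      rw [ih hL (hR.sublist (List.sublist_cons_self _ _))]
      simp
  | case4 cl il ls cr ir rs hlt ih =>
      rw [pvMerge, if_pos hlt]
      rw [ih (hL.sublist (List.sublist_cons_self _ _)) hR]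
      have hcl_lt : ∀ q ∈ (cr, ir) :: rs, cl < q.1 := by
        intro q hq
        rcases List.mem_cons.mp hq with rfl | hq
        · exact hlt
        · exact lt_trans hlt ((List.pairwise_cons.mp hR).1 q hq)
      dsimp only
      simp only [Prod.mk.injEq]
      refine ⟨?_, ?_⟩
      · -- added components agree: no R-side key equals cl
        apply congrArg
        apply List.filter_congr
        intro q hq
        have : q.1 ≠ cl := ne_of_gt (hcl_lt q hq)
        simp [this]
      · -- removed: head cl is kept (cl below every R key)
        have hhead : cl ∉ ((cr, ir) :: rs).map Prod.fst := by
          rw [List.mem_map]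
          rintro ⟨q, hq, hq1⟩
          exact absurd hq1 (ne_of_lt (hcl_lt q hq)).symm
        have hhead' : cl ∉ cr :: List.map Prod.fst rs := by simpa using hhead
        simp [hhead']
  | case5 cl il ls cr ir rs hnlt hlt ih =>
      rw [pvMerge, if_neg hnlt, if_pos hlt]
      rw [ih hL (hR.sublist (List.sublist_cons_self _ _))]
      have hcr_lt : ∀ q ∈ (cl, il) :: ls, cr < q.1 := by
        intro q hq
        rcases List.mem_cons.mp hq with rfl | hq
        · exact hlt
        · exact lt_trans hlt ((List.pairwise_cons.mp hL).1 q hq)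
      dsimp only
      simp only [Prod.mk.injEq]
      refine ⟨?_, ?_⟩
      · have hhead : cr ∉ ((cl, il) :: ls).map Prod.fst := by
          rw [List.mem_map]
          rintro ⟨q, hq, hq1⟩
          exact absurd hq1 (ne_of_lt (hcr_lt q hq)).symm
        have hhead' : cr ∉ cl :: List.map Prod.fst ls := by simpa using hhead
        simp [hhead']
      · apply congrArg
        apply List.filter_congr
        intro q hq
        have : q.1 ≠ cr := ne_of_gt (hcr_lt q hq)
        simp [this]
  | case6 cl il ls cr ir rs hnlt1 hnlt2 ih =>
      have heq : cl = cr := le_antisymm (le_of_not_gt hnlt2) (le_of_not_gt hnlt1)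
      subst heq
      rw [pvMerge, if_neg hnlt1, if_neg hnlt2]
      rw [ih (hL.sublist (List.sublist_cons_self _ _)) (hR.sublist (List.sublist_cons_self _ _))]
      have hLlt := (List.pairwise_cons.mp hL).1
      have hRlt := (List.pairwise_cons.mp hR).1
      simp only [Prod.mk.injEq]
      refine ⟨?_, ?_⟩
      · apply congrArg
        rw [List.filter_cons]
        simp only [List.map_cons, List.mem_cons, true_or, decide_true, Bool.not_true]
        apply List.filter_congr
        intro q hq
        have : q.1 ≠ cl := ne_of_gt (hRlt q hq)
        simp [this]
      · apply congrArg
        rw [List.filter_cons]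
        simp only [List.map_cons, List.mem_cons, true_or, decide_true, Bool.not_true]
        apply List.filter_congr
        intro q hq
        have : q.1 ≠ cl := ne_of_gt (hLlt q hq)
        simp [this]

-- the filtered key projection IS A's sorted set difference
theorem pvFilterKeys (X Y : List (List (String × String))) :
    ((pvSortedUniq Y).map Prod.fst).filter (fun c => !decide (c ∈ (pvDictOf X).keys))
      = PySem.List.sorted (PySem.Set.diff (pvDictOf Y).keys (pvDictOf X).keys) (fun c => c) false := by
  symm
  apply PySem.List.sorted_eq_of_perm_of_pairwise_lt
  · refine (List.perm_ext_iff_of_nodup (((pvSortedUniq_keys_nodup Y)).filter _)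
      (PySem.Set.nodup_diff _ _ (pvKeys_nodup Y))).mpr ?_
    intro c
    simp only [List.mem_filter, PySem.Set.mem_diff, pvSortedUniq_key_mem, Bool.not_eq_eq_eq_not,
      Bool.not_true, decide_eq_false_iff_not]
  · exact ((List.pairwise_map).mpr (pvSortedUniq_pairwise Y)).filter _

-- ===== VERDICT (by name: the statement is the Claim_ definition above) =====
theorem diff_imports_spec : Claim_equal_diff_imports := by
  intro L R _ _
  unfold Spec_diff_imports diff_imports diff_imports_alt
  dsimp only
  rw [pvDictOf_eq L, pvDictOf_eq R]
  rw [pvMerge_eq _ _ (pvSortedUniq_pairwise L) (pvSortedUniq_pairwise R)]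
  dsimp only
  -- rewrite the membership predicates to dict-key membership (they are pointwise equal functions)
  have hpredL : (fun (p : String × List (String × String)) => !decide (p.1 ∈ (pvSortedUniq L).map Prod.fst))
      = fun p => !decide (p.1 ∈ (pvDictOf L).keys) := by
    funext p; rw [decide_eq_decide.mpr (pvSortedUniq_key_mem L p.1)]
  have hpredR : (fun (p : String × List (String × String)) => !decide (p.1 ∈ (pvSortedUniq R).map Prod.fst))
      = fun p => !decide (p.1 ∈ (pvDictOf R).keys) := by
    funext p; rw [decide_eq_decide.mpr (pvSortedUniq_key_mem R p.1)]
  rw [hpredL, hpredR]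
  -- the mapped records only depend on the key (the value is the dict's value there)
  have hmapR : ((pvSortedUniq R).filter (fun p => !decide (p.1 ∈ (pvDictOf L).keys))).map (fun p => pvMkAdd p.1 p.2)
      = (((pvSortedUniq R).map Prod.fst).filter (fun c => !decide (c ∈ (pvDictOf L).keys))).map
          (fun c => [("type", "added"), ("content", c), ("line", pvLine ((pvDictOf R).getD c []))]) := by
    have hcomp : (fun p : String × List (String × String) => !decide (p.1 ∈ (pvDictOf L).keys))
        = ((fun c => !decide (c ∈ (pvDictOf L).keys)) ∘ Prod.fst) := rfl
    rw [hcomp, List.filter_map, List.map_map]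
    apply List.map_congr_left
    intro p hp
    have hm := (pvSortedUniq_mem R p.1 p.2).mp ((List.mem_filter.mp hp).1)
    simp [pvMkAdd, PySem.Dict.getD_eq_get?_getD, hm]
  have hmapL : ((pvSortedUniq L).filter (fun p => !decide (p.1 ∈ (pvDictOf R).keys))).map (fun p => pvMkRem p.1 p.2)
      = (((pvSortedUniq L).map Prod.fst).filter (fun c => !decide (c ∈ (pvDictOf R).keys))).map
          (fun c => [("type", "removed"), ("content", c), ("line", pvLine ((pvDictOf L).getD c []))]) := by
    have hcomp : (fun p : String × List (String × String) => !decide (p.1 ∈ (pvDictOf R).keys))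
        = ((fun c => !decide (c ∈ (pvDictOf R).keys)) ∘ Prod.fst) := rfl
    rw [hcomp, List.filter_map, List.map_map]
    apply List.map_congr_left
    intro p hp
    have hm := (pvSortedUniq_mem L p.1 p.2).mp ((List.mem_filter.mp hp).1)
    simp [pvMkRem, PySem.Dict.getD_eq_get?_getD, hm]
  rw [hmapR, hmapL, pvFilterKeys L R, pvFilterKeys R L]
  rw [PySem.List.foldl_append_singleton_eq_map, PySem.List.foldl_append_singleton_eq_map, List.nil_append]
  simp [List.length_map, PySem.List.length_sorted]
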